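-- pv_equiv track=rewrite | github.com/mini-llvm/mini-llvm | contrib/format.py | sort_includes
-- ===== SOURCE A (Python) =====
-- def sort_includes(content):
--     result_lines = []
--     lines = content.splitlines()
--     n = len(lines)
--     i = 0
--     while i < n:
--         if lines[i].startswith('#include'):
--             j = i
--             while j + 1 < n and lines[j + 1].startswith('#include'):
--                 j += 1
--             result_lines.extend(sorted(set(lines[i : j + 1]), key=str.lower))
--             i = j + 1
--         else:
--             result_lines.append(lines[i])
--             i += 1
--     return ''.join([line + '\n' for line in result_lines])
-- ===== SOURCE B (Python) =====
-- def sort_includes(content):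
--     # Decorate every line with a (run-id, sort-key) pair, then do ONE global
--     # stable sort of the decorated list: run-ids keep the blocks in place,
--     # the key orders #include lines case-insensitively inside their run.
--     deco = []
--     run = 0
--     prev = None
--     seen = set()
--     for line in content.splitlines():
--         inc = line.startswith('#include')
--         if prev is not None and inc != prev:
--             run += 1
--             seen = set()
--         prev = inc
--         if inc:
--             if line not in seen:
--                 seen.add(line)
--                 deco.append((run, line.lower(), line))
--         else:
--             deco.append((run, '', line))
--     deco.sort(key=lambda t: (t[0], t[1]))
--     return ''.join(t[2] + '\n' for t in deco)
-- ===== Notes on version B (the rewrite author's own statement) =====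
-- stated objective: alternative
-- what changed: B never sorts per block: it decorates every line with a (run-id, case-folded key) pair in one pass (deduplicating #include lines per run with a set), then performs ONE global stable sort of the decorated list by (run-id, key) and strips the decoration; run-ids keep non-include blocks in place while the key orders each include run, whereas A scans with an index and an inner lookahead loop and sorts each block separately. …
import Mathlib
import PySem

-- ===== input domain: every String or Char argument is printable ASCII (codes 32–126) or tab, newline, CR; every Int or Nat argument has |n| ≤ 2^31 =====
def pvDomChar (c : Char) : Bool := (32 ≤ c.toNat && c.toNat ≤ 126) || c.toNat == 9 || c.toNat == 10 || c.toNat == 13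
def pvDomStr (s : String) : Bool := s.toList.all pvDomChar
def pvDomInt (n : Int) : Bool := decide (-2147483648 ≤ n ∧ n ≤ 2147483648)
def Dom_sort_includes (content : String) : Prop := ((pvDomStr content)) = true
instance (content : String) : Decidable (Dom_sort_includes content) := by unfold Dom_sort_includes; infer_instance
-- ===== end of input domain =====

-- B replaces A's per-block scanning and per-block sorting by a decorate-then-one-global-stable-sort
-- scheme: each line gets a (run-id, case-folded key) tag in one pass, a single stable sort by the
-- tag orders every include run in place, and the tags are stripped; same task, different algorithm.


-- shared helper: line.startswith('#include')
def pvPred (l : String) : Bool := PySem.Str.startswith l "#include"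

-- ===== PORT A =====
-- sorted(set(xs), key=str.lower)  (A's per-block expression)
def pvSortedSet (xs : List String) : List String :=
  PySem.List.sorted (PySem.Set.ofList xs) (fun s => PySem.Str.lower s) false

-- inner 'while j + 1 < n and lines[j+1].startswith(...): j += 1'  (fuel only makes it total;
-- fuel = lines.length always suffices)
def sortIncludesScanJ (lines : List String) (fuel : Nat) (j : Nat) : Nat :=
  match fuel with
  | 0 => j
  | fuel + 1 =>
    if h : j + 1 < lines.length then
      if pvPred lines[j + 1] then sortIncludesScanJ lines fuel (j + 1) else j
    else j

-- outer 'while i < n' loop of A  (same fuel pattern)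
def sortIncludesLoop (lines : List String) (fuel : Nat) (i : Nat) : List String :=
  match fuel with
  | 0 => []
  | fuel + 1 =>
    if h : i < lines.length then
      if pvPred lines[i] then
        let j := sortIncludesScanJ lines lines.length i
        pvSortedSet (PySem.List.slice lines (some (i : Int)) (some ((j + 1 : Nat) : Int)))
          ++ sortIncludesLoop lines fuel (j + 1)
      else
        lines[i] :: sortIncludesLoop lines fuel (i + 1)
    else []

def sort_includes (content : String) : String :=
  let lines := PySem.Str.splitlines content
  PySem.Str.join "" ((sortIncludesLoop lines lines.length 0).map (fun l => l ++ "\n"))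

-- ===== PORT B =====
-- loop body of Source B: state = (run, prev, seen, deco)
def sortIncludesAltStep
    (st : Int × Option Bool × PySem.Set String × List (Int × String × String))
    (line : String) : Int × Option Bool × PySem.Set String × List (Int × String × String) :=
  let inc := pvPred line
  -- 'if prev is not None and inc != prev: run += 1; seen = set()'
  let rs : Int × PySem.Set String :=
    match st.2.1 with
    | some p => if inc ≠ p then (st.1 + 1, PySem.Set.empty) else (st.1, st.2.2.1)
    | none => (st.1, st.2.2.1)
  if inc then
    if PySem.Set.contains rs.2 line then (rs.1, some inc, rs.2, st.2.2.2)
    else (rs.1, some inc, PySem.Set.add rs.2 line,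
          st.2.2.2 ++ [(rs.1, PySem.Str.lower line, line)])
  else (rs.1, some inc, rs.2, st.2.2.2 ++ [(rs.1, "", line)])

def sort_includes_alt (content : String) : String :=
  let st := (PySem.Str.splitlines content).foldl sortIncludesAltStep
      (0, none, PySem.Set.empty, [])
  -- deco.sort(key=lambda t: (t[0], t[1]))  (stable)
  let deco := PySem.List.sorted2 st.2.2.2 (fun t => t.1) (fun t => t.2.1) false
  PySem.Str.join "" (deco.map (fun t => t.2.2 ++ "\n"))

-- ===== PRECONDITION & SPEC =====
-- Pre_ excludes contents containing two distinct '#include' lines equal case-insensitively: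
-- within one block A's tie order under key=str.lower depends on Python's unspecified set
-- iteration order (stated globally over all include lines for closed form, so it is slightly
-- conservative: it also excludes such pairs lying in different blocks, where A is deterministic).
def Pre_sort_includes (content : String) : Prop :=
  ((PySem.Str.splitlines content).filter (fun l => pvPred l)).Pairwise
    (fun a b => PySem.Str.lower a = PySem.Str.lower b → a = b)
instance (content : String) : Decidable (Pre_sort_includes content) := by
  unfold Pre_sort_includes; infer_instance
def pvWitness_sort_includes : String := "a"

def Spec_sort_includes (content : String) (out : String) : Prop := out = sort_includes_alt content
instance (content : String) (out : String) : Decidable (Spec_sort_includes content out) := by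
  unfold Spec_sort_includes; infer_instance

-- ===== CLAIM (what is proved, stated in full; the proofs are below) =====
def Claim_equal_sort_includes : Prop := ∀ (content : String), Dom_sort_includes content → Pre_sort_includes content → Spec_sort_includes content (sort_includes content)

-- ===== LEMMAS AND PROOFS =====

-- reference recursion for A: process the line list block by block
def pvProc : List String → List String
  | [] => []
  | l :: ls =>
    if pvPred l then
      pvSortedSet (l :: ls.takeWhile pvPred)
        ++ pvProc (ls.dropWhile pvPred)
    else l :: pvProc ls
termination_by xs => xs.length
decreasing_by
  all_goals simp only [List.length_cons]
  · have := List.length_dropWhile_le pvPred ls; omega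
  · omega

theorem scanJ_spec (lines : List String) (fuel : Nat) : ∀ (j : Nat),
    lines.length ≤ fuel + j + 1 →
    sortIncludesScanJ lines fuel j
      = j + ((lines.drop (j + 1)).takeWhile pvPred).length := by
  induction fuel with
  | zero =>
    intro j hj
    rw [sortIncludesScanJ, List.drop_eq_nil_of_le (by omega)]
    simp
  | succ fuel ih =>
    intro j hj
    rw [sortIncludesScanJ]
    split
    · rename_i h
      split
      · rename_i hp
        rw [ih (j + 1) (by omega)]
        rw [List.drop_eq_getElem_cons h, List.takeWhile_cons_of_pos hp]
        simp; omega
      · rename_i hp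
        rw [List.drop_eq_getElem_cons h,
          List.takeWhile_cons_of_neg (by simpa using hp)]
        simp
    · rename_i h
      rw [List.drop_eq_nil_of_le (by omega)]
      simp

theorem loop_eq_proc (lines : List String) (fuel : Nat) : ∀ (i : Nat),
    lines.length ≤ fuel + i →
    sortIncludesLoop lines fuel i = pvProc (lines.drop i) := by
  induction fuel with
  | zero =>
    intro i hi
    rw [sortIncludesLoop, List.drop_eq_nil_of_le (by omega), pvProc]
  | succ fuel ih =>
    intro i hi
    rw [sortIncludesLoop]
    split
    · rename_i h
      rw [List.drop_eq_getElem_cons h]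
      by_cases hp : pvPred lines[i]
      · simp only [hp, if_pos]
        set t := ((lines.drop (i + 1)).takeWhile pvPred) with ht
        have hj : sortIncludesScanJ lines lines.length i = i + t.length :=
          scanJ_spec lines lines.length i (by omega)
        have hslice : PySem.List.slice lines (some (i : Int))
            (some ((sortIncludesScanJ lines lines.length i + 1 : Nat) : Int))
            = lines[i] :: t := by
          rw [PySem.List.slice_natCast, hj]
          have : i + t.length + 1 - i = t.length + 1 := by omega
          rw [this, List.drop_eq_getElem_cons h, List.take_succ_cons]
          have hpre : t <+: lines.drop (i + 1) := List.takeWhile_prefix _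
          rw [← List.prefix_iff_eq_take.mp hpre]
        have hdw : (lines.drop (i + 1)).drop t.length
            = (lines.drop (i + 1)).dropWhile pvPred := by
          conv_lhs => rw [← List.takeWhile_append_dropWhile (p := pvPred)
            (l := lines.drop (i + 1)), ← ht]
          rw [List.drop_left]
        have hdrop : lines.drop (sortIncludesScanJ lines lines.length i + 1)
            = (lines.drop (i + 1)).dropWhile pvPred := by
          rw [hj, ← hdw, List.drop_drop]
          congr 1; omega
        have hlen : ((lines.drop (i + 1)).dropWhile pvPred).length ≤
            lines.length - (i + 1) := by
          have h1 := List.length_dropWhile_le (p := pvPred) (l := lines.drop (i + 1))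
          simpa using h1
        rw [ih (sortIncludesScanJ lines lines.length i + 1) (by omega), hslice, hdrop]
        conv_rhs => rw [pvProc]
        simp only [hp, if_pos]
        rw [ht]
      · simp only [hp]
        rw [ih (i + 1) (by omega)]
        conv_rhs => rw [pvProc]
        simp [hp]
    · rename_i h
      rw [List.drop_eq_nil_of_le (by omega), pvProc]

-- ---- B side: the stable sort as foldl/insertBy, generic lemmas ----

-- the tuple-key comparison of deco.sort(key=lambda t: (t[0], t[1]))
def pvBefore (a b : Int × String × String) : Bool :=
  decide (a.1 < b.1) || (!decide (b.1 < a.1) && decide (a.2.1 < b.2.1))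

def sortB (xs : List (Int × String × String)) : List (Int × String × String) :=
  xs.foldl (fun acc x => PySem.List.insertBy pvBefore x acc) []

theorem alt_sorted2 (xs : List (Int × String × String)) :
    PySem.List.sorted2 xs (fun t => t.1) (fun t => t.2.1) false = sortB xs := rfl

theorem insertBy_append_not_before {α : Type} (bef : α → α → Bool) (x : α)
    (s1 s2 : List α) (h : ∀ y ∈ s1, bef x y = false) :
    PySem.List.insertBy bef x (s1 ++ s2) = s1 ++ PySem.List.insertBy bef x s2 := by
  induction s1 with
  | nil => simp
  | cons y s1 ih =>
    have hy : bef x y = false := h y (by simp)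
    simp only [List.cons_append, PySem.List.insertBy, hy, Bool.false_eq_true, if_neg,
      not_false_eq_true]
    rw [ih (fun z hz => h z (by simp [hz]))]

theorem foldl_insertBy_split {α : Type} (bef : α → α → Bool) (d2 : List α) :
    ∀ (s1 acc : List α), (∀ x ∈ d2, ∀ y ∈ s1, bef x y = false) →
    d2.foldl (fun a x => PySem.List.insertBy bef x a) (s1 ++ acc)
      = s1 ++ d2.foldl (fun a x => PySem.List.insertBy bef x a) acc := by
  induction d2 with
  | nil => simp
  | cons x d2 ih =>
    intro s1 acc h
    simp only [List.foldl_cons]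
    rw [insertBy_append_not_before bef x s1 acc (h x (by simp)),
      ih s1 _ (fun z hz y hy => h z (by simp [hz]) y hy)]

theorem mem_foldl_insertBy {α : Type} (bef : α → α → Bool) (xs : List α) :
    ∀ (acc : List α) (y : α),
      y ∈ xs.foldl (fun a x => PySem.List.insertBy bef x a) acc → y ∈ acc ∨ y ∈ xs := by
  induction xs with
  | nil => intro acc y h; exact Or.inl (by simpa using h)
  | cons x xs ih =>
    intro acc y h
    rcases ih _ y h with h' | h'
    · rcases (PySem.List.mem_insertBy bef x y acc).mp h' with h'' | h''
      · simp [h'']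
      · simp [h'']
    · simp [h']

theorem sortB_append (d1 d2 : List (Int × String × String))
    (h : ∀ x ∈ d2, ∀ y ∈ d1, pvBefore x y = false) :
    sortB (d1 ++ d2) = sortB d1 ++ sortB d2 := by
  unfold sortB
  rw [List.foldl_append]
  have := foldl_insertBy_split pvBefore d2 (sortB d1) []
    (fun x hx y hy => h x hx y (by
      rcases mem_foldl_insertBy pvBefore d1 [] y hy with h' | h'
      · simp at h'
      · exact h'))
  simpa [sortB] using this

theorem foldl_insertBy_no_before {α : Type} (bef : α → α → Bool) (xs : List α) :
    ∀ (acc : List α), (∀ a ∈ xs, ∀ b ∈ acc ++ xs, bef a b = false) →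
    xs.foldl (fun a x => PySem.List.insertBy bef x a) acc = acc ++ xs := by
  induction xs with
  | nil => simp
  | cons x xs ih =>
    intro acc h
    simp only [List.foldl_cons]
    have hx : PySem.List.insertBy bef x acc = acc ++ [x] := by
      have := insertBy_append_not_before bef x acc []
        (fun y hy => h x (by simp) y (by simp [hy]))
      simpa [PySem.List.insertBy] using this
    rw [hx, ih (acc ++ [x]) (fun a ha b hb => by
      apply h a (by simp [ha])
      simp only [List.mem_append, List.mem_cons] at hb ⊢
      tauto)]
    simp

theorem insertBy_map {α β : Type} (f : α → β) (ba : α → α → Bool) (bb : β → β → Bool)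
    (hf : ∀ a b, bb (f a) (f b) = ba a b) (x : α) (l : List α) :
    PySem.List.insertBy bb (f x) (l.map f) = (PySem.List.insertBy ba x l).map f := by
  induction l with
  | nil => simp [PySem.List.insertBy]
  | cons y l ih =>
    simp only [List.map_cons, PySem.List.insertBy, hf x y]
    by_cases h : ba x y
    · simp [h]
    · simp [h, ih]

theorem foldl_insertBy_map {α β : Type} (f : α → β) (ba : α → α → Bool)
    (bb : β → β → Bool) (hf : ∀ a b, bb (f a) (f b) = ba a b) (xs : List α) :
    ∀ acc : List α,
    (xs.map f).foldl (fun a x => PySem.List.insertBy bb x a) (acc.map f)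
      = (xs.foldl (fun a x => PySem.List.insertBy ba x a) acc).map f := by
  induction xs with
  | nil => simp
  | cons x xs ih =>
    intro acc
    simp only [List.map_cons, List.foldl_cons]
    rw [insertBy_map f ba bb hf, ih]

-- ---- decorated runs: reference shape of the deco list Source B builds ----

def runsB : List String → Int → List (Int × String × String)
  | [], _ => []
  | l :: ls, r =>
    if pvPred l then
      (PySem.Set.ofList (l :: ls.takeWhile pvPred)).map
          (fun s => (r, PySem.Str.lower s, s))
        ++ runsB (ls.dropWhile pvPred) (r + 1)
    else
      ((l :: ls.takeWhile (fun x => !pvPred x)).map (fun s => (r, "", s)))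
        ++ runsB (ls.dropWhile (fun x => !pvPred x)) (r + 1)
termination_by xs _ => xs.length
decreasing_by
  all_goals simp only [List.length_cons]
  · have := List.length_dropWhile_le pvPred ls; omega
  · have := List.length_dropWhile_le (fun x => !pvPred x) ls; omega

theorem runsB_ge (lines : List String) (r : Int) :
    ∀ x ∈ runsB lines r, r ≤ x.1 := by
  induction lines, r using runsB.induct with
  | case1 r => simp [runsB]
  | case2 l ls r hp ih =>
    intro x hx
    rw [runsB] at hx
    simp only [hp, if_pos] at hx
    rcases List.mem_append.mp hx with h | h
    · rcases List.mem_map.mp h with ⟨s, _, rfl⟩; simp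
    · have := ih x h; omega
  | case3 l ls r hp ih =>
    intro x hx
    rw [runsB] at hx
    simp only [hp, Bool.false_eq_true, if_neg, not_false_eq_true] at hx
    rcases List.mem_append.mp hx with h | h
    · rcases List.mem_map.mp h with ⟨s, _, rfl⟩; simp
    · have := ih x h; omega

theorem pvProc_nonpred_prefix (block : List String)
    (h : ∀ x ∈ block, pvPred x = false) (rest : List String) :
    pvProc (block ++ rest) = block ++ pvProc rest := by
  induction block with
  | nil => simp
  | cons x b ih =>
    have hx : pvPred x = false := h x (by simp)
    rw [List.cons_append, pvProc]
    simp only [hx, Bool.false_eq_true, if_neg, not_false_eq_true]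
    rw [ih (fun z hz => h z (by simp [hz]))]
    simp

-- one global stable sort of the decorated runs = A's per-block processing
theorem sortB_runsB (lines : List String) (r : Int) :
    (sortB (runsB lines r)).map (fun t => t.2.2) = pvProc lines := by
  induction lines, r using runsB.induct with
  | case1 r => simp [runsB, sortB, pvProc]
  | case2 l ls r hp ih =>
    rw [runsB]
    simp only [hp, if_pos]
    rw [sortB_append _ _ (by
      intro x hx y hy
      have hxr := runsB_ge _ _ x hx
      rcases List.mem_map.mp hy with ⟨s, _, rfl⟩
      simp only [pvBefore]
      have h1 : ¬ (x.1 < r) := by omega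
      have h2 : r < x.1 := by omega
      simp [h1, h2])]
    have hmap : sortB ((PySem.Set.ofList (l :: ls.takeWhile pvPred)).map
        (fun s => ((r : Int), PySem.Str.lower s, s)))
        = (PySem.List.sorted (PySem.Set.ofList (l :: ls.takeWhile pvPred))
            (fun s => PySem.Str.lower s) false).map
          (fun s => ((r : Int), PySem.Str.lower s, s)) := by
      rw [PySem.List.sorted_eq_foldl_insertBy]
      unfold sortB
      have := foldl_insertBy_map (fun s => ((r : Int), PySem.Str.lower s, s))
        (fun a b => decide (PySem.Str.lower a < PySem.Str.lower b)) pvBefore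
        (by intro a b; simp [pvBefore]) (PySem.Set.ofList (l :: ls.takeWhile pvPred)) []
      simpa using this
    rw [hmap]
    conv_rhs => rw [pvProc]
    simp only [hp, if_pos]
    rw [List.map_append, ih]
    congr 1
    simp [pvSortedSet, List.map_map, Function.comp_def]
  | case3 l ls r hp ih =>
    rw [runsB]
    simp only [hp, Bool.false_eq_true, if_neg, not_false_eq_true]
    rw [sortB_append _ _ (by
      intro x hx y hy
      have hxr := runsB_ge _ _ x hx
      rcases List.mem_map.mp hy with ⟨s, _, rfl⟩
      simp only [pvBefore]
      have h1 : ¬ (x.1 < r) := by omega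
      have h2 : r < x.1 := by omega
      simp [h1, h2])]
    have hid : sortB ((l :: ls.takeWhile (fun x => !pvPred x)).map
        (fun s => ((r : Int), "", s)))
        = (l :: ls.takeWhile (fun x => !pvPred x)).map (fun s => ((r : Int), "", s)) := by
      unfold sortB
      have := foldl_insertBy_no_before pvBefore
        ((l :: ls.takeWhile (fun x => !pvPred x)).map (fun s => ((r : Int), "", s))) []
        (by
          intro a ha b hb
          simp only [List.nil_append] at hb
          rcases List.mem_map.mp ha with ⟨s, _, rfl⟩
          rcases List.mem_map.mp hb with ⟨t, _, rfl⟩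
          simp [pvBefore])
      simpa using this
    rw [hid, List.map_append, ih]
    have hblk : pvProc (l :: ls) =
        (l :: ls.takeWhile (fun x => !pvPred x))
          ++ pvProc (ls.dropWhile (fun x => !pvPred x)) := by
      have hsplit : l :: ls
          = (l :: ls.takeWhile (fun x => !pvPred x))
            ++ ls.dropWhile (fun x => !pvPred x) := by
        simp [List.takeWhile_append_dropWhile]
      conv_lhs => rw [hsplit]
      exact pvProc_nonpred_prefix _ (by
        intro x hx
        rcases List.mem_cons.mp hx with rfl | hx
        · simpa using hp
        · have := List.mem_takeWhile_imp hx
          simpa using this) _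
    rw [hblk]
    congr 1
    simp [List.map_map, Function.comp_def]

-- ---- characterizing Source B's decorating fold ----

set_option maxRecDepth 4096 in
theorem foldB_incl (block : List String) (hb : ∀ l ∈ block, pvPred l = true) :
    ∀ (r : Int) (seen : PySem.Set String) (deco : List (Int × String × String)),
    block.foldl sortIncludesAltStep (r, some true, seen, deco)
      = (r, some true, PySem.Set.update seen block,
         deco ++ ((PySem.Set.ofList block).filter
             (fun y => !PySem.Set.contains seen y)).map
           (fun s => (r, PySem.Str.lower s, s))) := by
  induction block with
  | nil => intro r seen deco; simp [PySem.Set.update, PySem.Set.ofList]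
  | cons l t ih =>
    intro r seen deco
    have hl : pvPred l = true := hb l (by simp)
    rw [List.foldl_cons]
    by_cases hc : PySem.Set.contains seen l
    · have hm : l ∈ seen := (PySem.Set.contains_iff _ _).mp hc
      have hstep : sortIncludesAltStep (r, some true, seen, deco) l
          = (r, some true, seen, deco) := by
        simp [sortIncludesAltStep, hl, hm]
      rw [hstep, ih (fun z hz => hb z (by simp [hz]))]
      have hupd : PySem.Set.update seen (l :: t) = PySem.Set.update seen t := by
        simp only [PySem.Set.update, List.foldl_cons, PySem.Set.add_of_mem hm]
      have hfil : (PySem.Set.ofList (l :: t)).filter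
            (fun y => !PySem.Set.contains seen y)
          = (PySem.Set.ofList t).filter (fun y => !PySem.Set.contains seen y) := by
        rw [PySem.Set.ofList_cons]
        simp only [PySem.Set.discard, List.filter_cons, hc, Bool.not_true,
          Bool.false_eq_true, if_neg, not_false_eq_true, List.filter_filter]
        apply List.filter_congr
        intro y _
        by_cases hy : PySem.Set.contains seen y
        · have hmy : y ∈ seen := (PySem.Set.contains_iff _ _).mp hy
          simp [hmy]
        · have hne : (y == l) = false := by
            by_contra hx
            have : y = l := by
              have := eq_of_beq (a := y) (b := l) (by
                cases hyx : (y == l) <;> simp_all)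
              exact this
            subst this
            exact hy hc
          simp [hne]
      rw [hupd, hfil]
    · have hnm : l ∉ seen := fun hm => hc ((PySem.Set.contains_iff _ _).mpr hm)
      have hstep : sortIncludesAltStep (r, some true, seen, deco) l
          = (r, some true, PySem.Set.add seen l,
             deco ++ [(r, PySem.Str.lower l, l)]) := by
        simp [sortIncludesAltStep, hl, hnm]
      rw [hstep, ih (fun z hz => hb z (by simp [hz]))]
      have hupd : PySem.Set.update seen (l :: t)
          = PySem.Set.update (PySem.Set.add seen l) t := by
        simp [PySem.Set.update]
      have hadd : PySem.Set.add seen l = seen ++ [l] :=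
        PySem.Set.add_of_not_mem hnm
      have hfil : (PySem.Set.ofList (l :: t)).filter
            (fun y => !PySem.Set.contains seen y)
          = l :: (PySem.Set.ofList t).filter
              (fun y => !PySem.Set.contains (PySem.Set.add seen l) y) := by
        rw [PySem.Set.ofList_cons]
        simp only [PySem.Set.discard, List.filter_cons, hc, Bool.not_false,
          if_pos, List.filter_filter]
        congr 1
        apply List.filter_congr
        intro y _
        have hcontains : PySem.Set.contains (PySem.Set.add seen l) y
            = (PySem.Set.contains seen y || (y == l)) := by
          rw [hadd]
          show List.contains (seen ++ [l]) y = (List.contains seen y || (y == l))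
          rw [List.contains_append]
          by_cases hyl : y = l <;> simp [hyl]
        rw [hcontains]
        by_cases hyl : y = l <;> simp [hyl]
      rw [hupd, hfil]
      simp
  

theorem foldB_excl (block : List String) (hb : ∀ l ∈ block, pvPred l = false) :
    ∀ (r : Int) (seen : PySem.Set String) (deco : List (Int × String × String)),
    block.foldl sortIncludesAltStep (r, some false, seen, deco)
      = (r, some false, seen, deco ++ block.map (fun s => (r, "", s))) := by
  induction block with
  | nil => intro r seen deco; simp
  | cons l t ih =>
    intro r seen deco
    have hl : pvPred l = false := hb l (by simp)
    rw [List.foldl_cons]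
    have hstep : sortIncludesAltStep (r, some false, seen, deco) l
        = (r, some false, seen, deco ++ [(r, "", l)]) := by
      simp [sortIncludesAltStep, hl]
    rw [hstep, ih (fun z hz => hb z (by simp [hz]))]
    simp

theorem spineB (lines : List String) (r0 : Int) :
    ∀ (r : Int) (p : Option Bool) (seen : PySem.Set String)
      (deco : List (Int × String × String)),
    (∀ l t, lines = l :: t → p ≠ some (pvPred l)) →
    (p = none → seen = PySem.Set.empty) →
    (lines.foldl sortIncludesAltStep (r, p, seen, deco)).2.2.2
      = deco ++ runsB lines (if p.isSome then r + 1 else r) := by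
  induction lines, r0 using runsB.induct with
  | case1 _ => intro r p seen deco _ _; simp [runsB]
  | case2 l ls r1 hp ih =>
    intro r p seen deco hfresh hseen
    -- the first step of the fold opens run r*
    have hstep : ∃ rstar : Int,
        rstar = (if p.isSome then r + 1 else r) ∧
        sortIncludesAltStep (r, p, seen, deco) l
          = (rstar, some true, PySem.Set.add PySem.Set.empty l,
             deco ++ [(rstar, PySem.Str.lower l, l)]) := by
      cases p with
      | none =>
        refine ⟨r, by simp, ?_⟩
        have h0 : seen = PySem.Set.empty := hseen rfl
        subst h0
        simp only [sortIncludesAltStep, hp]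
        rfl
      | some c =>
        have hc : c = false := by
          have := hfresh l ls rfl
          cases c
          · rfl
          · exact absurd (by rw [hp]) this
        subst hc
        refine ⟨r + 1, by simp, ?_⟩
        simp only [sortIncludesAltStep, hp]
        rfl
    rcases hstep with ⟨rstar, hrs, hstep⟩
    rw [← hrs]
    rw [List.foldl_cons, hstep]
    have hsplit : ls = ls.takeWhile pvPred ++ ls.dropWhile pvPred :=
      (List.takeWhile_append_dropWhile).symm
    conv_lhs => rw [hsplit]
    rw [List.foldl_append]
    rw [foldB_incl (ls.takeWhile pvPred)
      (fun z hz => List.mem_takeWhile_imp hz) rstar _ _]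
    rw [ih rstar (some true) _ _
      (by
        intro l' t' hdw
        have := List.head?_dropWhile_not pvPred ls
        rw [hdw] at this
        simp only [List.head?_cons] at this
        simp [this])
      (by intro h; cases h)]
    have hruns : runsB (l :: ls) rstar
        = (PySem.Set.ofList (l :: ls.takeWhile pvPred)).map
            (fun s => (rstar, PySem.Str.lower s, s))
          ++ runsB (ls.dropWhile pvPred) (rstar + 1) := by
      rw [runsB]; simp [hp]
    rw [hruns]
    have hadd : PySem.Set.add PySem.Set.empty l = [l] := rfl
    have hofl : (PySem.Set.ofList (l :: ls.takeWhile pvPred)).map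
          (fun s => (rstar, PySem.Str.lower s, s))
        = (rstar, PySem.Str.lower l, l) ::
          ((PySem.Set.ofList (ls.takeWhile pvPred)).filter
              (fun y => !PySem.Set.contains (PySem.Set.add PySem.Set.empty l) y)).map
            (fun s => (rstar, PySem.Str.lower s, s)) := by
      rw [PySem.Set.ofList_cons, hadd]
      simp only [List.map_cons]
      congr 2
      simp only [PySem.Set.discard]
      apply List.filter_congr
      intro y _
      by_cases hyl : y = l <;> simp [hyl]
    rw [hofl]
    simp
  | case3 l ls r1 hp ih =>
    intro r p seen deco hfresh hseen
    have hp' : pvPred l = false := by simpa using hp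
    have hstep : ∃ rstar : Int,
        rstar = (if p.isSome then r + 1 else r) ∧
        ∃ seen' : PySem.Set String,
        sortIncludesAltStep (r, p, seen, deco) l
          = (rstar, some false, seen', deco ++ [(rstar, "", l)]) := by
      cases p with
      | none =>
        refine ⟨r, by simp, seen, ?_⟩
        simp only [sortIncludesAltStep, hp']
        rfl
      | some c =>
        have hc : c = true := by
          have := hfresh l ls rfl
          cases c
          · exact absurd (by rw [hp']) this
          · rfl
        subst hc
        refine ⟨r + 1, by simp, PySem.Set.empty, ?_⟩
        simp only [sortIncludesAltStep, hp']
        rfl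
    rcases hstep with ⟨rstar, hrs, seen', hstep⟩
    rw [← hrs]
    rw [List.foldl_cons, hstep]
    have hsplit : ls = ls.takeWhile (fun x => !pvPred x)
        ++ ls.dropWhile (fun x => !pvPred x) :=
      (List.takeWhile_append_dropWhile).symm
    conv_lhs => rw [hsplit]
    rw [List.foldl_append]
    rw [foldB_excl (ls.takeWhile (fun x => !pvPred x))
      (fun z hz => by
        have := List.mem_takeWhile_imp hz
        simpa using this) rstar _ _]
    rw [ih rstar (some false) _ _
      (by
        intro l' t' hdw
        have := List.head?_dropWhile_not (fun x => !pvPred x) ls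
        rw [hdw] at this
        simp only [List.head?_cons] at this
        simp only [Bool.not_eq_false'] at this
        simp [this])
      (by intro h; cases h)]
    have hruns : runsB (l :: ls) rstar
        = ((l :: ls.takeWhile (fun x => !pvPred x)).map (fun s => (rstar, "", s)))
          ++ runsB (ls.dropWhile (fun x => !pvPred x)) (rstar + 1) := by
      rw [runsB]; simp [hp']
    rw [hruns]
    simp

-- ===== VERDICT (by name: the statement is the Claim_ definition above) =====
theorem sort_includes_spec : Claim_equal_sort_includes := by
  intro content _ _
  unfold Spec_sort_includes sort_includes sort_includes_alt
  have hA : sortIncludesLoop (PySem.Str.splitlines content)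
        (PySem.Str.splitlines content).length 0
      = pvProc (PySem.Str.splitlines content) := by
    simpa using loop_eq_proc (PySem.Str.splitlines content)
      (PySem.Str.splitlines content).length 0 (by omega)
  have hB : ((PySem.Str.splitlines content).foldl sortIncludesAltStep
        (0, none, PySem.Set.empty, [])).2.2.2
      = runsB (PySem.Str.splitlines content) 0 := by
    have := spineB (PySem.Str.splitlines content) 0 0 none PySem.Set.empty []
      (by intro l t _; simp) (by intro _; rfl)
    simpa using this
  simp only [hA, hB, alt_sorted2]
  have hout : (sortB (runsB (PySem.Str.splitlines content) 0)).map
        (fun t => t.2.2 ++ "\n")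
      = (pvProc (PySem.Str.splitlines content)).map (fun l => l ++ "\n") := by
    rw [← sortB_runsB (PySem.Str.splitlines content) 0, List.map_map]
    rfl
  rw [hout]
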